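-- pv_equiv track=rewrite | github.com/FanKuan44/FinalProject_ | test__.py | insert_to_list_x
-- ===== SOURCE A (Python) =====
-- def insert_to_list_x(x):
--     added = ['|', '|', '|', '|']
--     indices = [4, 7, 10, 14]
--
--     acc = 0
--     for i in range(len(added)):
--         x.insert(indices[i] + acc, added[i])
--         acc += 1
--     return x
-- ===== SOURCE B (Python) =====
-- def insert_to_list_x(x):
--     result = (x[:4] + ['|'] + x[4:7] + ['|'] + x[7:10] + ['|']
--               + x[10:14] + ['|'] + x[14:])
--     x[:] = result
--     return x
-- ===== Notes on version B (the rewrite author's own statement) =====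
-- stated objective: simpler
-- what changed: Replaces the loop of four list.insert calls with accumulator bookkeeping by a single slice-and-concatenate expression built from the fixed boundaries 4/7/10/14 (assigned back with x[:] to keep the in-place mutation).
import Mathlib
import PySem

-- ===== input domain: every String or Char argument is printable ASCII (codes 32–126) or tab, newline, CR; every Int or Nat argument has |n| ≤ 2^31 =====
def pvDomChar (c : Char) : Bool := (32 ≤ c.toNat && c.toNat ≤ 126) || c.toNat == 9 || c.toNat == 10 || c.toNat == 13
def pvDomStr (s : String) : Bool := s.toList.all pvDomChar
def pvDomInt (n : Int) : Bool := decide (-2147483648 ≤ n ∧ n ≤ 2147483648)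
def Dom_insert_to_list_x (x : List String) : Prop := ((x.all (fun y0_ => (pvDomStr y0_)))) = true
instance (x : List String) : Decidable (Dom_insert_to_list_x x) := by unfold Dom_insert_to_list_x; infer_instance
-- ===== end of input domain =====

-- B builds the result in one slice-and-concatenate pass instead of four shifting inserts
-- (both Pythons mutate the argument list in place; the equivalence proved is about the return value).
-- ===== PORT A =====
def insert_to_list_x (x : List String) : List String :=
  let added : List String := ["|", "|", "|", "|"]
  let indices : List Int := [4, 7, 10, 14]
  let st := (PySem.List.pyRange 0 (added.length : Int) 1).foldl
    (fun (s : List String × Int) i =>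
      (PySem.List.insert s.1 ((PySem.List.pyGet? indices i).getD 0 + s.2)
        ((PySem.List.pyGet? added i).getD ""), s.2 + 1))
    (x, 0)
  st.1

-- ===== PORT B =====
def insert_to_list_x_alt (x : List String) : List String :=
  PySem.List.slice x none (some 4) ++ ["|"] ++
  PySem.List.slice x (some 4) (some 7) ++ ["|"] ++
  PySem.List.slice x (some 7) (some 10) ++ ["|"] ++
  PySem.List.slice x (some 10) (some 14) ++ ["|"] ++
  PySem.List.slice x (some 14) none

-- ===== PRECONDITION & SPEC =====
def Spec_insert_to_list_x (x : List String) (out : List String) : Prop := out = insert_to_list_x_alt x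
instance (x : List String) (out : List String) : Decidable (Spec_insert_to_list_x x out) := by unfold Spec_insert_to_list_x; infer_instance

-- ===== CLAIM (what is proved, stated in full; the proofs are below) =====
def Claim_equal_insert_to_list_x : Prop := ∀ (x : List String), Dom_insert_to_list_x x → Spec_insert_to_list_x x (insert_to_list_x x)

-- ===== LEMMAS AND PROOFS =====

-- Python list.insert at a non-negative position clamps past the end, exactly like take/drop.
lemma ins_take_drop (xs : List String) (p : Nat) (v : String) :
    PySem.List.insert xs (p : Int) v = xs.take p ++ v :: xs.drop p := by
  rcases le_or_gt p xs.length with h | h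
  · exact PySem.List.insert_natCast xs p v h
  · have h1 : xs.take p = xs := List.take_of_length_le (le_of_lt h)
    have h2 : xs.drop p = [] := List.drop_eq_nil_of_le (le_of_lt h)
    rw [h1, h2]
    simp only [PySem.List.insert, PySem.List.sliceIndices]
    norm_num
    rw [min_eq_right (by exact_mod_cast le_of_lt h)]
    have hp : ¬((p : Int) < 0) := by omega
    simp [hp]

lemma pyRange04 : PySem.List.pyRange 0 4 1 = [0, 1, 2, 3] := by decide

-- ===== VERDICT (by name: the statement is the Claim_ definition above) =====
theorem insert_to_list_x_spec : Claim_equal_insert_to_list_x := by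
  intro x _
  show insert_to_list_x x = insert_to_list_x_alt x
  simp only [insert_to_list_x, insert_to_list_x_alt, List.length_cons, List.length_nil]
  norm_num [pyRange04, List.foldl, PySem.List.pyGet?, PySem.List.pyIdx?]
  simp only [show Int.toNat 2 = 2 from rfl, show Int.toNat 3 = 3 from rfl,
    List.getElem_cons_succ, List.getElem_cons_zero]
  norm_num
  rw [PySem.List.slice_to x (by norm_num : (0:Int) ≤ 4),
      PySem.List.slice_toNat x (by norm_num : (0:Int) ≤ 4) (by norm_num : (0:Int) ≤ 7),
      PySem.List.slice_toNat x (by norm_num : (0:Int) ≤ 7) (by norm_num : (0:Int) ≤ 10),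
      PySem.List.slice_toNat x (by norm_num : (0:Int) ≤ 10) (by norm_num : (0:Int) ≤ 14),
      PySem.List.slice_from x (by norm_num : (0:Int) ≤ 14),
      show ((4:Int)) = ((4:Nat):Int) from rfl, ins_take_drop,
      show ((8:Int)) = ((8:Nat):Int) from rfl, ins_take_drop,
      show ((12:Int)) = ((12:Nat):Int) from rfl, ins_take_drop,
      show ((17:Int)) = ((17:Nat):Int) from rfl, ins_take_drop]
  norm_num
  rcases x with _|⟨a1,_|⟨a2,_|⟨a3,_|⟨a4,_|⟨a5,_|⟨a6,_|⟨a7,_|⟨a8,_|⟨a9,_|⟨a10,_|⟨a11,_|⟨a12,_|⟨a13,_|⟨a14,t⟩⟩⟩⟩⟩⟩⟩⟩⟩⟩⟩⟩⟩⟩ <;>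
    simp [List.take, List.drop]
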